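-- pv_equiv track=rewrite | github.com/svshyam91/geeksforgeeks | maximize_toys.py | maximizeToys
-- ===== SOURCE A (Python) =====
-- def maximizeToys(s, totalAmt, costToys):
--     costToys.sort()
--     count=0
--     for ct in costToys:
--         if ct > totalAmt:
--             break;
--         else:
--             totalAmt-=ct
--             count+=1
--     return count
-- ===== SOURCE B (Python) =====
-- def maximizeToys(s, totalAmt, costToys):
--     # Two phases: build the prefix-sum table of the sorted costs,
--     # then the answer is the index of the first prefix exceeding the budget
--     # (or the table length when none exceeds it).
--     costToys.sort()
--     prefix = []
--     run = 0
--     for c in costToys: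
--         run += c
--         prefix.append(run)
--     return next((i for i, p in enumerate(prefix) if p > totalAmt), len(prefix))
-- ===== Notes on version B (the rewrite author's own statement) =====
-- stated objective: alternative
-- what changed: Replaces A's single decrement-and-break scan over a running budget with a two-phase prefix-sum-table construction followed by a first-index-exceeding search (next over enumerate).
import Mathlib
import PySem

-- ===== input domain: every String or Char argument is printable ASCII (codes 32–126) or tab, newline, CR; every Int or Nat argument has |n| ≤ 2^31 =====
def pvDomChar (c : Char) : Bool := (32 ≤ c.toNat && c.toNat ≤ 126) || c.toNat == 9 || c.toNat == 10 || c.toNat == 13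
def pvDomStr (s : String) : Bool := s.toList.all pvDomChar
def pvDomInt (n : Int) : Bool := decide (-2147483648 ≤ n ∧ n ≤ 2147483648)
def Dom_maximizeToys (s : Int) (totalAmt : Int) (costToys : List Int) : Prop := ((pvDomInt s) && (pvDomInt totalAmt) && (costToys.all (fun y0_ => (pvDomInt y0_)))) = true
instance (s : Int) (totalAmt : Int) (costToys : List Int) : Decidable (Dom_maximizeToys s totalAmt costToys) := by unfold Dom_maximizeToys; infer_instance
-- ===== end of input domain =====

-- B replaces A's decrement-and-break budget scan with a prefix-sum table plus a first-index-exceeding search (alternative decomposition, same cost); costToys is sorted in place by both.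
-- ===== PORT A =====
def maximizeToysLoop (totalAmt : Int) (count : Int) : List Int → Int
  | [] => count
  | ct :: rest => if ct > totalAmt then count else maximizeToysLoop (totalAmt - ct) (count + 1) rest

def maximizeToys (s : Int) (totalAmt : Int) (costToys : List Int) : Int :=
  maximizeToysLoop totalAmt 0 (PySem.List.sorted costToys (fun x => x) false)

-- ===== PORT B =====
-- prefix-sum table of the sorted costs
def pvPrefix (run : Int) : List Int → List Int
  | [] => []
  | c :: rest => (run + c) :: pvPrefix (run + c) rest

-- next((i for i, p in enumerate(prefix) if p > totalAmt), len(prefix))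
def pvFirstOver (totalAmt : Int) (i : Int) (len : Int) : List Int → Int
  | [] => len
  | p :: rest => if p > totalAmt then i else pvFirstOver totalAmt (i + 1) len rest

def maximizeToys_alt (s : Int) (totalAmt : Int) (costToys : List Int) : Int :=
  let sortedToys := PySem.List.sorted costToys (fun x => x) false
  let prefixSums := pvPrefix 0 sortedToys
  pvFirstOver totalAmt 0 (prefixSums.length : Int) prefixSums

-- ===== PRECONDITION & SPEC =====
def Spec_maximizeToys (s : Int) (totalAmt : Int) (costToys : List Int) (out : Int) : Prop := out = maximizeToys_alt s totalAmt costToys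
instance (s : Int) (totalAmt : Int) (costToys : List Int) (out : Int) : Decidable (Spec_maximizeToys s totalAmt costToys out) := by unfold Spec_maximizeToys; infer_instance

-- ===== CLAIM (what is proved, stated in full; the proofs are below) =====
def Claim_equal_maximizeToys : Prop := ∀ (s : Int) (totalAmt : Int) (costToys : List Int), Dom_maximizeToys s totalAmt costToys → Spec_maximizeToys s totalAmt costToys (maximizeToys s totalAmt costToys)

-- ===== LEMMAS AND PROOFS =====
theorem pvPrefix_length (run : Int) (l : List Int) : (pvPrefix run l).length = l.length := by
  induction l generalizing run with
  | nil => rfl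
  | cons c rest ih => simp [pvPrefix, ih]

theorem loop_eq_firstOver (l : List Int) (t run i : Int) :
    maximizeToysLoop (t - run) i l = pvFirstOver t i (i + (l.length : Int)) (pvPrefix run l) := by
  induction l generalizing run i with
  | nil => simp [maximizeToysLoop, pvPrefix, pvFirstOver]
  | cons c rest ih =>
    simp only [maximizeToysLoop, pvPrefix, pvFirstOver]
    by_cases h : run + c > t
    · have h1 : c > t - run := by omega
      simp [h, h1]
    · have h1 : ¬ (c > t - run) := by omega
      simp only [h, h1, if_false]
      have harith : t - run - c = t - (run + c) := by ring
      rw [harith, ih (run + c) (i + 1)]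
      have hlen : i + 1 + (rest.length : Int) = i + ((rest.length : Int) + 1) := by ring
      rw [hlen]
      simp [List.length_cons]

-- ===== VERDICT (by name: the statement is the Claim_ definition above) =====
theorem maximizeToys_spec : Claim_equal_maximizeToys := by
  intro s t l _
  unfold Spec_maximizeToys maximizeToys maximizeToys_alt
  have := loop_eq_firstOver (PySem.List.sorted l (fun x => x) false) t 0 0
  simpa [pvPrefix_length] using this
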